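-- pv_equiv track=rewrite | github.com/RileyMathews/davhome | dav/core/filters.py | property_lines
-- ===== SOURCE A (Python) =====
-- def property_lines(component_text, property_name):
--     lines = component_text.replace("\r\n", "\n").split("\n")
--     prefix = f"{property_name.upper()}"
--     result = []
--     for line in lines:
--         if not line:
--             continue
--         upper = line.upper()
--         if upper.startswith(prefix + ":") or upper.startswith(prefix + ";"):
--             result.append(line)
--     return result
-- ===== SOURCE B (Python) =====
-- def property_lines(component_text, property_name):
--     # Single streaming pass over the characters: build each line in an
--     # accumulator, strip one '\r' before a '\n', and test only the first
--     # n+1 characters of the line (case-insensitively) instead of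
--     # replace/split/uppercasing whole lines.
--     name = property_name.upper()
--     n = len(name)
--     result = []
--     cur = ""
--     for ch in component_text:
--         if ch == "\n":
--             line = cur[:-1] if cur.endswith("\r") else cur
--             if len(line) > n and line[n] in ":;" and line[:n].upper() == name:
--                 result.append(line)
--             cur = ""
--         else:
--             cur += ch
--     if len(cur) > n and cur[n] in ":;" and cur[:n].upper() == name:
--         result.append(cur)
--     return result
-- ===== Notes on version B (the rewrite author's own statement) =====
-- stated objective: alternative
-- what changed: Replaces the replace/split/per-line-upper pipeline with a single streaming pass over the characters that accumulates each line, strips one '\r' before each '\n', and case-insensitively tests only the first n+1 characters of a line instead of uppercasing whole lines.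
import Mathlib
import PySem

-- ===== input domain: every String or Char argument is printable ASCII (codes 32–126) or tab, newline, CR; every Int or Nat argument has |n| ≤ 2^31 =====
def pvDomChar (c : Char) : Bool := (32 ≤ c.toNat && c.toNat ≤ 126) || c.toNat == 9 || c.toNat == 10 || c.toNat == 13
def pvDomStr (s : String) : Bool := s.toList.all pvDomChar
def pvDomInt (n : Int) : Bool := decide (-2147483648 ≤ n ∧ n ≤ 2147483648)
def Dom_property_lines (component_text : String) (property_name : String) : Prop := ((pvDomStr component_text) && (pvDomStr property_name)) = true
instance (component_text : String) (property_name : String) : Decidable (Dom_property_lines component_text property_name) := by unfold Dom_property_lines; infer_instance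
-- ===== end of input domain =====

-- B replaces A's replace/split/per-line-upper pipeline with a single streaming character
-- scan (line accumulator, one '\r' stripped before each '\n', only the first n+1 chars of
-- a line tested case-insensitively); return values proved equal on all inputs.

-- ===== PORT A =====
-- A, transliterated on the character lists: replace "\r\n"→"\n", split on "\n",
-- then the for-loop with its continue/append as a foldl over the line list.
def property_lines (component_text : String) (property_name : String) : List String :=
  let lines := PySem.Chars.splitOn
      (PySem.Chars.replace component_text.toList ['\r', '\n'] ['\n']) ['\n']
  let prefixChars := PySem.Chars.upper property_name.toList
  (lines.foldl (fun result line =>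
      if line.isEmpty then result                                  -- if not line: continue
      else
        let upper := PySem.Chars.upper line
        if PySem.Chars.startswith upper (prefixChars ++ [':'])
            || PySem.Chars.startswith upper (prefixChars ++ [';']) then
          result ++ [line]
        else result) []).map String.ofList

-- ===== PORT B =====
-- one step of B's for-loop; the state is (result, cur)
def pvBStep (uname : List Char) : List (List Char) × List Char → Char → List (List Char) × List Char :=
  fun (st : List (List Char) × List Char) (ch : Char) =>
    if ch = '\n' then
      -- line = cur[:-1] if cur.endswith("\r") else cur
      let ln := if st.2.getLast? = some '\r' then st.2.dropLast else st.2
      -- if len(line) > n and line[n] in ":;" and line[:n].upper() == name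
      if h : uname.length < ln.length then
        if (ln[uname.length] = ':' ∨ ln[uname.length] = ';')
            ∧ PySem.Chars.upper (ln.take uname.length) = uname then
          (st.1 ++ [ln], [])
        else (st.1, [])
      else (st.1, [])
    else (st.1, st.2 ++ [ch])   -- cur += ch

def property_lines_alt (component_text : String) (property_name : String) : List String :=
  let uname := PySem.Chars.upper property_name.toList
  let st := component_text.toList.foldl (pvBStep uname) ([], [])
  -- final flush of cur (no '\r' stripping here, as in Source B)
  (if h : uname.length < st.2.length then
    if (st.2[uname.length] = ':' ∨ st.2[uname.length] = ';')
        ∧ PySem.Chars.upper (st.2.take uname.length) = uname then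
      st.1 ++ [st.2]
    else st.1
  else st.1).map String.ofList

-- ===== PRECONDITION & SPEC =====
def Spec_property_lines (component_text : String) (property_name : String) (out : List String) : Prop := out = property_lines_alt component_text property_name
instance (component_text : String) (property_name : String) (out : List String) : Decidable (Spec_property_lines component_text property_name out) := by unfold Spec_property_lines; infer_instance

-- ===== CLAIM (what is proved, stated in full; the proofs are below) =====
def Claim_equal_property_lines : Prop := ∀ (component_text : String) (property_name : String), Dom_property_lines component_text property_name → Spec_property_lines component_text property_name (property_lines component_text property_name)

-- ===== LEMMAS AND PROOFS =====

-- reference recursions (proof-only): "\r\n"→"\n" replacement and the split on '\n'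
def pvReplaceRec : List Char → List Char
  | [] => []
  | [c] => [c]
  | c :: d :: t => if c = '\r' ∧ d = '\n' then '\n' :: pvReplaceRec t else c :: pvReplaceRec (d :: t)

def pvSplitNL : List Char → List (List Char)
  | [] => [[]]
  | c :: t => if c = '\n' then [] :: pvSplitNL t else (pvSplitNL t).modifyHead (c :: ·)

def pvDropCR (l : List Char) : List Char :=
  if l.getLast? = some '\r' then l.dropLast else l

def pvMapButLast (f : List Char → List Char) : List (List Char) → List (List Char)
  | [] => []
  | [x] => [x]
  | x :: y :: t => f x :: pvMapButLast f (y :: t)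

-- the two line tests, as predicates
def pvKeepA (uname : List Char) (ln : List Char) : Bool :=
  !ln.isEmpty
    && (PySem.Chars.startswith (PySem.Chars.upper ln) (uname ++ [':'])
        || PySem.Chars.startswith (PySem.Chars.upper ln) (uname ++ [';']))

def pvKeepB (uname : List Char) (ln : List Char) : Bool :=
  if h : uname.length < ln.length then
    decide ((ln[uname.length] = ':' ∨ ln[uname.length] = ';')
        ∧ PySem.Chars.upper (ln.take uname.length) = uname)
  else false

theorem pvSplitNL_ne_nil (s : List Char) : pvSplitNL s ≠ [] := by
  induction s with
  | nil => simp [pvSplitNL]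
  | cons c t ih =>
    simp only [pvSplitNL]
    split
    · simp
    · cases h : pvSplitNL t with
      | nil => exact absurd h ih
      | cons a l => simp [List.modifyHead]

theorem pvSplitNL_nl (x : List Char) : pvSplitNL ('\n' :: x) = [] :: pvSplitNL x := by
  simp [pvSplitNL]

theorem pvSplitNL_cons_ne (x : List Char) (c : Char) (h : c ≠ '\n') :
    pvSplitNL (c :: x) = (pvSplitNL x).modifyHead (c :: ·) := by
  simp [pvSplitNL, h]

theorem pvMapButLast_cons (f : List Char → List Char) (x : List Char) (ys : List (List Char))
    (h : ys ≠ []) : pvMapButLast f (x :: ys) = f x :: pvMapButLast f ys := by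
  cases ys with
  | nil => exact absurd rfl h
  | cons y t => simp [pvMapButLast]

theorem pvDropCR_cons (c : Char) (l : List Char) (h : l ≠ [] ∨ c ≠ '\r') :
    pvDropCR (c :: l) = c :: pvDropCR l := by
  cases l with
  | nil =>
    rcases h with h | h
    · exact absurd rfl h
    · simp [pvDropCR, h]
  | cons d t =>
    simp only [pvDropCR]
    rw [List.getLast?_cons_cons]
    split <;> simp [List.dropLast]

theorem pvSplitNL_head_ne_nil (c : Char) (t : List Char) (h : c ≠ '\n') :
    ∃ a s', pvSplitNL (c :: t) = (c :: a) :: s' := by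
  simp only [pvSplitNL, if_neg h]
  cases hs : pvSplitNL t with
  | nil => exact absurd hs (pvSplitNL_ne_nil t)
  | cons a s' => exact ⟨a, s', by simp [List.modifyHead]⟩

-- PySem.Chars.replace with "\r\n"→"\n" computes pvReplaceRec
theorem pv_replace_go (fuel : Nat) (l acc : List Char) (h : l.length ≤ fuel) :
    PySem.Chars.replace.go ['\r', '\n'] ['\n'] fuel l acc = acc.reverse ++ pvReplaceRec l := by
  induction fuel generalizing l acc with
  | zero =>
    cases l with
    | nil => simp [PySem.Chars.replace.go, pvReplaceRec]
    | cons c t => simp at h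
  | succ fuel ih =>
    match l with
    | [] => simp [PySem.Chars.replace.go, pvReplaceRec]
    | [c] =>
      simp only [PySem.Chars.replace.go]
      have : ['\r', '\n'].isPrefixOf [c] = false := by
        simp [List.isPrefixOf]
      rw [if_neg (by simp [this])]
      rw [ih [] (c :: acc) (by simp)]
      simp [pvReplaceRec]
    | c :: d :: t =>
      simp only [PySem.Chars.replace.go]
      by_cases hc : c = '\r' ∧ d = '\n'
      · obtain ⟨hc, hd⟩ := hc
        subst hc hd
        rw [if_pos (by simp [List.isPrefixOf])]
        rw [show List.drop ['\r', '\n'].length ('\r' :: '\n' :: t) = t from rfl,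
          ih t (['\n'].reverse ++ acc) (by simp at h ⊢; omega)]
        simp [pvReplaceRec]
      · rw [if_neg (by simp [List.isPrefixOf]; tauto)]
        rw [ih (d :: t) (c :: acc) (by simp at h ⊢; omega)]
        simp [pvReplaceRec, hc]

-- PySem.Chars.splitOn with sep "\n" computes pvSplitNL
theorem pv_split_go (fuel : Nat) (l cur : List Char) (acc : List (List Char)) (h : l.length < fuel) :
    PySem.Chars.splitOn.go ['\n'] fuel l cur acc
      = acc.reverse ++ (pvSplitNL l).modifyHead (cur.reverse ++ ·) := by
  induction fuel generalizing l cur acc with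
  | zero => omega
  | succ fuel ih =>
    match l with
    | [] => simp [PySem.Chars.splitOn.go, pvSplitNL]
    | c :: t =>
      simp only [PySem.Chars.splitOn.go]
      by_cases hc : c = '\n'
      · subst hc
        rw [if_pos (by simp [List.isPrefixOf])]
        rw [show List.drop ['\n'].length ('\n' :: t) = t from rfl,
          ih t [] (cur.reverse :: acc) (by simp at h ⊢; omega)]
        simp [pvSplitNL]
        cases pvSplitNL t <;> simp [List.modifyHead]
      · rw [if_neg (by simp [List.isPrefixOf]; exact fun e => hc e.symm)]
        rw [ih t (c :: cur) acc (by simp at h ⊢; omega)]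
        simp only [pvSplitNL, if_neg hc]
        cases hs : pvSplitNL t with
        | nil => exact absurd hs (pvSplitNL_ne_nil t)
        | cons a s' => simp [List.modifyHead]

-- replacing "\r\n" then splitting on "\n" = splitting, then dropping one trailing '\r'
-- from every segment but the last
theorem pv_splitNL_replaceRec (s : List Char) :
    pvSplitNL (pvReplaceRec s) = pvMapButLast pvDropCR (pvSplitNL s) := by
  induction s using pvReplaceRec.induct with
  | case1 => simp [pvReplaceRec, pvSplitNL, pvMapButLast]
  | case2 c =>
    simp only [pvReplaceRec]
    by_cases hc : c = '\n'
    · subst hc; simp [pvSplitNL, pvMapButLast, pvDropCR]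
    · simp [pvSplitNL, hc, pvMapButLast, List.modifyHead]
  | case3 c d t hcd ih =>
    obtain ⟨hc, hd⟩ := hcd
    subst hc hd
    have hrep : pvReplaceRec ('\r' :: '\n' :: t) = '\n' :: pvReplaceRec t := by
      simp [pvReplaceRec]
    have h1 : pvSplitNL ('\r' :: '\n' :: t) = ['\r'] :: pvSplitNL t := by
      rw [pvSplitNL_cons_ne _ _ (by decide), pvSplitNL_nl]
      simp [List.modifyHead]
    rw [hrep, pvSplitNL_nl, ih, h1, pvMapButLast_cons _ _ _ (pvSplitNL_ne_nil t)]
    simp [pvDropCR]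
  | case4 c d t hcd ih =>
    have hrep : pvReplaceRec (c :: d :: t) = c :: pvReplaceRec (d :: t) := by
      simp only [pvReplaceRec, if_neg hcd]
    rw [hrep]
    by_cases hc : c = '\n'
    · subst hc
      rw [pvSplitNL_nl, pvSplitNL_nl, ih,
        pvMapButLast_cons _ _ _ (pvSplitNL_ne_nil (d :: t))]
      simp [pvDropCR]
    · rw [pvSplitNL_cons_ne _ _ hc, pvSplitNL_cons_ne _ _ hc, ih]
      by_cases hd : d = '\n'
      · have hcr : c ≠ '\r' := fun e => hcd ⟨e, hd⟩
        subst hd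
        rw [pvSplitNL_nl, pvMapButLast_cons _ _ _ (pvSplitNL_ne_nil t)]
        simp only [List.modifyHead]
        rw [pvMapButLast_cons pvDropCR [c] (pvSplitNL t) (pvSplitNL_ne_nil t),
          pvDropCR_cons c [] (Or.inr hcr)]
      · obtain ⟨a, s', h3⟩ := pvSplitNL_head_ne_nil d t hd
        rw [h3]
        cases s' with
        | nil => simp [pvMapButLast, List.modifyHead]
        | cons b s'' =>
          rw [pvMapButLast_cons pvDropCR (d :: a) (b :: s'') (by simp)]
          simp only [List.modifyHead]
          rw [pvMapButLast_cons pvDropCR (c :: d :: a) (b :: s'') (by simp),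
            pvDropCR_cons c (d :: a) (Or.inl (by simp))]

theorem pv_split_replace (s : List Char) :
    PySem.Chars.splitOn (PySem.Chars.replace s ['\r', '\n'] ['\n']) ['\n']
      = pvMapButLast pvDropCR (pvSplitNL s) := by
  have hrep : PySem.Chars.replace s ['\r', '\n'] ['\n'] = pvReplaceRec s := by
    unfold PySem.Chars.replace
    rw [if_neg (by simp)]
    simpa using pv_replace_go s.length s [] le_rfl
  unfold PySem.Chars.splitOn
  rw [hrep, pv_split_go _ _ _ _ (by omega)]
  rw [pv_splitNL_replaceRec]
  cases pvMapButLast pvDropCR (pvSplitNL s) <;> simp [List.modifyHead]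

-- the two line tests agree
theorem pv_upperChar_punct (c p : Char) (hp : p = ':' ∨ p = ';') :
    PySem.Chars.upperChar c = p ↔ c = p := by
  unfold PySem.Chars.upperChar
  by_cases hl : PySem.Chars.islower c = true
  · simp only [hl, if_pos]
    have h1 : 97 ≤ c.toNat ∧ c.toNat ≤ 122 := by
      simp only [PySem.Chars.islower, Bool.and_eq_true, decide_eq_true_eq, Char.le_def] at hl
      exact ⟨hl.1, hl.2⟩
    have hv : (c.toNat - 32).isValidChar := Or.inl (by omega)
    have h2 : (Char.ofNat (c.toNat - 32)).toNat = c.toNat - 32 := by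
      simp [Char.toNat_ofNat, hv]
    constructor
    · intro he
      exfalso
      have h3 := congrArg Char.toNat he
      rw [h2] at h3
      rcases hp with h | h <;> subst h <;>
        [change c.toNat - 32 = 58 at h3; change c.toNat - 32 = 59 at h3] <;> omega
    · intro he
      exfalso
      subst he
      rcases hp with h | h <;> rw [h] at h1 <;>
        [change 97 ≤ 58 ∧ _ at h1; change 97 ≤ 59 ∧ _ at h1] <;> omega
  · simp [hl]

theorem pv_startswith_punct (uname ln : List Char) (ch : Char)
    (h : uname.length < ln.length) (hp : ch = ':' ∨ ch = ';') :
    PySem.Chars.startswith (PySem.Chars.upper ln) (uname ++ [ch])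
      = (decide (ln[uname.length] = ch) && decide (PySem.Chars.upper (ln.take uname.length) = uname)) := by
  rw [Bool.eq_iff_iff]
  simp only [Bool.and_eq_true, decide_eq_true_eq]
  rw [PySem.Chars.startswith_iff]
  unfold PySem.Chars.upper
  rw [List.prefix_iff_eq_take]
  have hm : uname.length < (ln.map PySem.Chars.upperChar).length := by simpa using h
  have ht : List.take (uname.length + 1) (ln.map PySem.Chars.upperChar)
      = List.take uname.length (ln.map PySem.Chars.upperChar) ++ [PySem.Chars.upperChar ln[uname.length]] := by
    rw [List.take_add_one]
    congr 1
    rw [List.getElem?_eq_getElem hm]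
    simp
  constructor
  · intro he
    rw [show (uname ++ [ch]).length = uname.length + 1 by simp, ht] at he
    have hlen : uname.length = (List.take uname.length (ln.map PySem.Chars.upperChar)).length := by
      simp [List.length_take]; omega
    obtain ⟨h1, h2⟩ := List.append_inj he hlen
    have h3 : PySem.Chars.upperChar ln[uname.length] = ch := by
      simpa using h2.symm
    refine ⟨(pv_upperChar_punct _ _ hp).mp h3, ?_⟩
    rw [← List.map_take] at h1
    exact h1.symm
  · rintro ⟨h1, h2⟩
    rw [show (uname ++ [ch]).length = uname.length + 1 by simp, ht]
    rw [List.map_take] at h2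
    rw [h2, h1, (pv_upperChar_punct ch ch hp).mpr rfl]

theorem pv_keep_eq (uname ln : List Char) : pvKeepA uname ln = pvKeepB uname ln := by
  unfold pvKeepA pvKeepB
  by_cases h : uname.length < ln.length
  · rw [dif_pos h]
    have hne : ln.isEmpty = false := by
      cases ln
      · simp at h
      · simp
    rw [hne, pv_startswith_punct uname ln ':' h (Or.inl rfl),
        pv_startswith_punct uname ln ';' h (Or.inr rfl)]
    rw [Bool.eq_iff_iff]
    simp only [Bool.not_false, Bool.true_and, Bool.or_eq_true, Bool.and_eq_true,
      decide_eq_true_eq]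
    tauto
  · rw [dif_neg h]
    have hsw : ∀ ch : Char, PySem.Chars.startswith (PySem.Chars.upper ln) (uname ++ [ch]) = false := by
      intro ch
      rw [Bool.eq_false_iff]
      intro hsw
      rw [PySem.Chars.startswith_iff] at hsw
      have hle := hsw.length_le
      simp only [PySem.Chars.upper, List.length_append, List.length_map,
        List.length_singleton] at hle
      omega
    simp [hsw]

-- A's loop is a filter by pvKeepA
theorem pv_A_foldl (uname : List Char) (lines : List (List Char)) (res : List (List Char)) :
    lines.foldl (fun result line =>
      if line.isEmpty then result
      else
        let upper := PySem.Chars.upper line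
        if PySem.Chars.startswith upper (uname ++ [':'])
            || PySem.Chars.startswith upper (uname ++ [';']) then
          result ++ [line]
        else result) res = res ++ lines.filter (pvKeepA uname) := by
  induction lines generalizing res with
  | nil => simp
  | cons l t ih =>
    rw [List.foldl_cons, ih, List.filter_cons]
    by_cases he : l.isEmpty = true
    · have hk : pvKeepA uname l = false := by simp [pvKeepA, he]
      simp [he, hk]
    · by_cases hs : (PySem.Chars.startswith (PySem.Chars.upper l) (uname ++ [':'])
          || PySem.Chars.startswith (PySem.Chars.upper l) (uname ++ [';'])) = true
      · have hk : pvKeepA uname l = true := by simp [pvKeepA, he, hs]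
        simp [he, hs, hk]
      · have hk : pvKeepA uname l = false := by
          simp only [Bool.or_eq_true, not_or, Bool.not_eq_true] at hs
          simp [pvKeepA, he, hs.1, hs.2]
        simp only [Bool.not_eq_true] at hs
        simp [he, hs, hk]

-- the final flush of B, as a filter step
theorem pv_flush_eq (uname : List Char) (res : List (List Char)) (cur : List Char) :
    (if h : uname.length < cur.length then
      if (cur[uname.length] = ':' ∨ cur[uname.length] = ';')
          ∧ PySem.Chars.upper (cur.take uname.length) = uname then
        res ++ [cur]
      else res
    else res) = res ++ (if pvKeepB uname cur then [cur] else []) := by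
  unfold pvKeepB
  split
  · split
    · next hc => simp [hc]
    · next hc => simp [hc]
  · simp

-- B's loop computes the same filter over the '\n'-segments
theorem pv_B_foldl (uname : List Char) (s : List Char) (res : List (List Char)) (cur : List Char) :
    (let st := s.foldl (pvBStep uname) (res, cur)
     if h : uname.length < st.2.length then
      if (st.2[uname.length] = ':' ∨ st.2[uname.length] = ';')
          ∧ PySem.Chars.upper (st.2.take uname.length) = uname then
        st.1 ++ [st.2]
      else st.1
     else st.1)
    = res ++ (pvMapButLast pvDropCR ((pvSplitNL s).modifyHead (cur ++ ·))).filter (pvKeepB uname) := by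
  induction s generalizing res cur with
  | nil =>
    simp only [List.foldl_nil]
    rw [pv_flush_eq]
    simp [pvSplitNL, pvMapButLast, List.modifyHead, List.filter]
    cases pvKeepB uname cur <;> rfl
  | cons c t ih =>
    by_cases hc : c = '\n'
    · subst hc
      have hstep : pvBStep uname (res, cur) '\n'
          = (res ++ (if pvKeepB uname (pvDropCR cur) then [pvDropCR cur] else []), []) := by
        show (if h : uname.length < (pvDropCR cur).length then _ else _) = _
        unfold pvKeepB
        split
        · split <;> (next hx => (simp only [pvDropCR, hx, reduceIte, decide_eq_true_eq]; split <;> simp))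
        · simp
      rw [List.foldl_cons, hstep, ih]
      rw [pvSplitNL_nl]
      have hmh : List.modifyHead (fun x => cur ++ x) ([] :: pvSplitNL t) = cur :: pvSplitNL t := by
        simp [List.modifyHead]
      rw [hmh, pvMapButLast_cons pvDropCR cur (pvSplitNL t) (pvSplitNL_ne_nil t),
        List.filter_cons]
      have hid : List.modifyHead (fun x => ([] : List Char) ++ x) (pvSplitNL t) = pvSplitNL t := by
        cases pvSplitNL t <;> simp [List.modifyHead]
      rw [hid]
      by_cases hk : pvKeepB uname (pvDropCR cur) = true <;> simp [hk]
    · have hstep : pvBStep uname (res, cur) c = (res, cur ++ [c]) := by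
        simp [pvBStep, hc]
      rw [List.foldl_cons, hstep, ih, pvSplitNL_cons_ne _ _ hc]
      have hcomp : List.modifyHead (fun x => cur ++ x) (List.modifyHead (c :: ·) (pvSplitNL t))
          = List.modifyHead (fun x => (cur ++ [c]) ++ x) (pvSplitNL t) := by
        cases pvSplitNL t <;> simp [List.modifyHead]
      rw [hcomp]

-- ===== VERDICT (by name: the statement is the Claim_ definition above) =====
theorem property_lines_spec : Claim_equal_property_lines := by
  intro component_text property_name _
  unfold Spec_property_lines property_lines property_lines_alt
  simp only
  rw [pv_split_replace, pv_A_foldl, pv_B_foldl]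
  rw [List.nil_append, List.nil_append]
  have hid : List.modifyHead (fun x => ([] : List Char) ++ x) (pvSplitNL component_text.toList)
      = pvSplitNL component_text.toList := by
    cases pvSplitNL component_text.toList <;> simp [List.modifyHead]
  rw [hid, List.filter_congr (fun x _ => pv_keep_eq (PySem.Chars.upper property_name.toList) x)]
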